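-- pv_equiv track=rewrite | github.com/Leo-Neumuller/area | Api/src/utils/Services.py | get_headers_from_message
-- ===== SOURCE A (Python) =====
-- def get_headers_from_message(baseData: dict, toFill: dict) -> dict:
--     """
--     Get headers from message
--     :param baseData: Base data
--     :param toFill: Dict to fill
--     :return: Headers
--     """
--     if "headers" not in baseData:
--         return toFill
--     for header in baseData["headers"]:
--         for key in toFill.keys():
--             if key == header["name"]:
--                 toFill[key] = header["value"]
--     return toFill
-- ===== SOURCE B (Python) =====
-- def get_headers_from_message(baseData: dict, toFill: dict) -> dict:
--     """
--     Get headers from message: for each key of toFill, scan the headers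
--     back-to-front and take the first (i.e. last-occurring) header with that
--     name, writing it once; same in-place fill of toFill as the original.
--     """
--     if "headers" not in baseData:
--         return toFill
--     headers = baseData["headers"]
--     for key in toFill:
--         for header in reversed(headers):
--             if header["name"] == key:
--                 toFill[key] = header["value"]
--                 break
--     return toFill
-- ===== Notes on version B (the rewrite author's own statement) =====
-- stated objective: alternative
-- what changed: A iterates headers outermost and overwrites every matching toFill key at every matching header (last header wins by repeated overwriting); B inverts the nesting: it iterates toFill's keys outermost and for each key does a backward search of the headers with an early break at the first match, writing each key at most once.
import Mathlib
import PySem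

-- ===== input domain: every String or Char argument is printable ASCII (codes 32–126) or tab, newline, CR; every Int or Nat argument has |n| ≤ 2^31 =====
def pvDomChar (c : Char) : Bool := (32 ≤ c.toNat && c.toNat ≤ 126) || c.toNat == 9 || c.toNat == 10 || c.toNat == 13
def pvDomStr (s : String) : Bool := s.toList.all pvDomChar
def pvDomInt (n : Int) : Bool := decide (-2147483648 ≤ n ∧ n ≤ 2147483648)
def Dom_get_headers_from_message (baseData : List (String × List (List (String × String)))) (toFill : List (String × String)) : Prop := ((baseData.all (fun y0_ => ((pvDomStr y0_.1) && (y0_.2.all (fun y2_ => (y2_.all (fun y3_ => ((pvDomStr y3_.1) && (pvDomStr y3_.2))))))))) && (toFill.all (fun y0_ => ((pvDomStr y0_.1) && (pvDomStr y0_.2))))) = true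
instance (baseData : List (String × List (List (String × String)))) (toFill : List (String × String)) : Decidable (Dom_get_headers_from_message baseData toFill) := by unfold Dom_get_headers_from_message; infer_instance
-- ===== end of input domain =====

-- B inverts A's loop nesting: A sweeps headers outermost overwriting matching toFill keys,
-- B iterates toFill's keys and back-searches the headers with an early break (objective:
-- alternative decomposition; in Python both fill toFill in place — the equivalence is about the returned value).


-- the header's name / value as both ports read them
def pvNm (h : List (String × String)) : String := ((PySem.Dict.mk h).get? "name").getD ""
def pvVl (h : List (String × String)) : String := ((PySem.Dict.mk h).get? "value").getD ""

-- ===== PORT A =====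
-- for header in baseData["headers"]: for key in toFill.keys(): if key == header["name"]: toFill[key] = header["value"]
def get_headers_from_message (baseData : List (String × List (List (String × String)))) (toFill : List (String × String)) : List (String × String) :=
  if (PySem.Dict.mk baseData).contains "headers" = false then toFill
  else
    ((((PySem.Dict.mk baseData).get? "headers").getD []).foldl
      (fun tf h =>
        (PySem.Dict.keys tf).foldl
          (fun tf2 key =>
            if key == pvNm h then tf2.insert key (pvVl h) else tf2)
          tf)
      (PySem.Dict.mk toFill)).items

-- ===== PORT B =====
-- inner loop: for header in reversed(headers): if header["name"] == key: toFill[key] = header["value"]; break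
def pvFillKey (headers : List (List (String × String))) (tf : PySem.Dict String String)
    (key : String) : PySem.Dict String String :=
  match headers.reverse.find? (fun h => pvNm h == key) with
  | some h => tf.insert key (pvVl h)
  | none => tf

-- for key in toFill: <inner loop>
def get_headers_from_message_alt (baseData : List (String × List (List (String × String)))) (toFill : List (String × String)) : List (String × String) :=
  if (PySem.Dict.mk baseData).contains "headers" = false then toFill
  else
    let headers := ((PySem.Dict.mk baseData).get? "headers").getD []
    ((PySem.Dict.mk toFill).keys.foldl (pvFillKey headers) (PySem.Dict.mk toFill)).items

-- ===== PRECONDITION & SPEC =====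
-- Pre_ excludes exactly the inputs where Python A raises KeyError: a header missing
-- the "name" key while toFill is non-empty, or a header whose name is a key of
-- toFill but which is missing the "value" key.
def Pre_get_headers_from_message (baseData : List (String × List (List (String × String)))) (toFill : List (String × String)) : Prop :=
  ∀ h ∈ (((PySem.Dict.mk baseData).get? "headers").getD []),
    toFill ≠ [] →
      (PySem.Dict.mk h).contains "name" = true ∧
      ((PySem.Dict.mk toFill).contains (((PySem.Dict.mk h).get? "name").getD "") = true →
        (PySem.Dict.mk h).contains "value" = true)
instance (baseData : List (String × List (List (String × String)))) (toFill : List (String × String)) : Decidable (Pre_get_headers_from_message baseData toFill) := by unfold Pre_get_headers_from_message; infer_instance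

def pvWitness_get_headers_from_message : (List (String × List (List (String × String)))) × (List (String × String)) :=
  ([("headers", [[("name", "a"), ("value", "v")], [("name", "zz")]])], [("a", "0"), ("b", "1")])

def Spec_get_headers_from_message (baseData : List (String × List (List (String × String)))) (toFill : List (String × String)) (out : List (String × String)) : Prop := out = get_headers_from_message_alt baseData toFill
instance (baseData : List (String × List (List (String × String)))) (toFill : List (String × String)) (out : List (String × String)) : Decidable (Spec_get_headers_from_message baseData toFill out) := by unfold Spec_get_headers_from_message; infer_instance

-- ===== CLAIM (what is proved, stated in full; the proofs are below) =====
def Claim_equal_get_headers_from_message : Prop := ∀ (baseData : List (String × List (List (String × String)))) (toFill : List (String × String)), Dom_get_headers_from_message baseData toFill → Pre_get_headers_from_message baseData toFill → Spec_get_headers_from_message baseData toFill (get_headers_from_message baseData toFill)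

-- ===== LEMMAS AND PROOFS =====

-- value of the LAST header in hs named k (what A's loops leave at key k)
def pvF (hs : List (List (String × String))) (k : String) : Option String :=
  hs.foldl (fun o h => if pvNm h == k then some (pvVl h) else o) none

lemma pv_F_append (hs : List (List (String × String))) (h : List (String × String)) (k : String) :
    pvF (hs ++ [h]) k = if pvNm h == k then some (pvVl h) else pvF hs k := by
  simp [pvF, List.foldl_append]

-- the last match forward is the first match backward
lemma pv_F_find (hs : List (List (String × String))) (k : String) :
    pvF hs k = (hs.reverse.find? (fun h => pvNm h == k)).map pvVl := by
  induction hs using List.reverseRecOn with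
  | nil => simp [pvF]
  | append_singleton hs h ih =>
    rw [pv_F_append, List.reverse_append]
    simp only [List.reverse_singleton, List.singleton_append, List.find?_cons]
    split_ifs with hc
    · rw [hc]; rfl
    · rw [show (pvNm h == k) = false from by simpa using hc, ih]

-- A's inner loop over a key list is a single conditional insert
lemma pv_inner (n v : String) (ks : List String) (d : PySem.Dict String String) :
    ks.foldl (fun t2 key => if key == n then t2.insert key v else t2) d
      = if ks.contains n then d.insert n v else d := by
  induction ks generalizing d with
  | nil => simp
  | cons k ks ih =>
    rw [List.foldl_cons]
    by_cases hk : k = n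
    · subst hk
      rw [if_pos BEq.rfl, ih]
      have hc : (k :: ks).contains k = true := by simp
      rw [hc, if_pos rfl]
      split_ifs with h
      · rw [PySem.Dict.insert_insert_self]
      · rfl
    · rw [if_neg (by simp [hk]), ih]
      have hnkb : (n == k) = false := beq_eq_false_iff_ne.2 (fun e => hk e.symm)
      rw [List.contains_cons, hnkb, Bool.false_or]

-- characterisation of A's double loop: each toFill entry gets the last matching header value
lemma pv_A_char (hs : List (List (String × String))) (ps : List (String × String)) :
    (hs.foldl
      (fun tf h =>
        (PySem.Dict.keys tf).foldl
          (fun tf2 key =>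
            if key == pvNm h then tf2.insert key (pvVl h) else tf2)
          tf)
      (PySem.Dict.mk ps)).items
    = ps.map (fun q => (q.1, (pvF hs q.1).getD q.2)) := by
  induction hs using List.reverseRecOn with
  | nil => simp [pvF]
  | append_singleton hs h ih =>
    rw [List.foldl_append, List.foldl_cons, List.foldl_nil]
    rw [pv_inner]
    set d := hs.foldl
      (fun tf h =>
        (PySem.Dict.keys tf).foldl
          (fun tf2 key =>
            if key == pvNm h then tf2.insert key (pvVl h) else tf2)
          tf)
      (PySem.Dict.mk ps) with hd
    have hkeys : (PySem.Dict.keys d).contains (pvNm h) = d.items.any (fun p => p.1 == pvNm h) := by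
      by_cases hm : pvNm h ∈ d.items.map (fun p => p.1)
      · obtain ⟨p, hp, he⟩ := List.mem_map.1 hm
        have : d.items.any (fun p => p.1 == pvNm h) = true :=
          List.any_eq_true.2 ⟨p, hp, by simp [he]⟩
        simp [PySem.Dict.keys, hm, this]
      · have : d.items.any (fun p => p.1 == pvNm h) = false := by
          refine List.any_eq_false.2 ?_
          intro p hp
          simp only [beq_iff_eq]
          intro he
          exact hm (List.mem_map.2 ⟨p, hp, he⟩)
        simp [PySem.Dict.keys, hm, this]
    by_cases hc : d.items.any (fun p => p.1 == pvNm h) = true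
    · rw [if_pos (by rw [hkeys]; exact hc)]
      have hcd : d.contains (pvNm h) = true := hc
      rw [PySem.Dict.items_insert_of_contains _ _ hcd, ih, List.map_map]
      apply List.map_congr_left
      intro q _
      by_cases hq : (q.1 == pvNm h) = true
      · have hq' := eq_of_beq hq
        simp [Function.comp, pv_F_append, hq', BEq.rfl]
      · have hq0 : q.1 ≠ pvNm h := fun e => hq (beq_iff_eq.2 e)
        have hq' : (pvNm h == q.1) = false := beq_eq_false_iff_ne.2 (Ne.symm hq0)
        have hqb : (q.1 == pvNm h) = false := beq_eq_false_iff_ne.2 hq0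
        simp [Function.comp, hqb, pv_F_append, hq']
    · rw [if_neg (by rw [hkeys]; simpa using hc), ih]
      apply List.map_congr_left
      intro q hqmem
      have hq : (q.1 == pvNm h) = false := by
        rcases Bool.eq_false_or_eq_true (q.1 == pvNm h) with h' | h'
        · exfalso
          apply hc
          rw [ih]
          exact List.any_eq_true.2 ⟨(q.1, (pvF hs q.1).getD q.2),
            List.mem_map.2 ⟨q, hqmem, rfl⟩, by simpa using h'⟩
        · exact h'
      have hq' : (pvNm h == q.1) = false :=
        beq_eq_false_iff_ne.2 (Ne.symm (beq_eq_false_iff_ne.1 hq))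
      simp [pv_F_append, hq']

-- B's key loop: each visited key of the dict gets the backward-found header value, if any
lemma pv_keyloop (hs : List (List (String × String))) (ks : List String)
    (d : PySem.Dict String String)
    (hks : ∀ k ∈ ks, d.items.any (fun p => p.1 == k) = true) :
    (ks.foldl (pvFillKey hs) d).items
      = d.items.map (fun q =>
          if ks.contains q.1 then
            (q.1, ((hs.reverse.find? (fun h => pvNm h == q.1)).map pvVl).getD q.2)
          else q) := by
  induction ks generalizing d with
  | nil => simp
  | cons k ks ih =>
    rw [List.foldl_cons]
    cases hf : hs.reverse.find? (fun h => pvNm h == k) with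
    | none =>
      have hstep : pvFillKey hs d k = d := by simp [pvFillKey, hf]
      rw [hstep, ih _ (fun k' hk' => hks k' (List.mem_cons_of_mem _ hk'))]
      apply List.map_congr_left
      intro q _
      by_cases hq : (q.1 == k) = true
      · have hq' := eq_of_beq hq
        have hfq : hs.reverse.find? (fun h => pvNm h == q.1) = none := by rw [hq']; exact hf
        simp only [List.contains_cons, hq, Bool.true_or, if_pos, hfq, Option.map_none,
          Option.getD_none]
        split_ifs <;> simp
      · rw [List.contains_cons, show (q.1 == k) = false from by simpa using hq, Bool.false_or]
    | some hh =>
      have hcd : d.contains k = true := hks k List.mem_cons_self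
      have hstep : pvFillKey hs d k = d.insert k (pvVl hh) := by simp [pvFillKey, hf]
      have hks' : ∀ k' ∈ ks,
          (d.insert k (pvVl hh)).items.any (fun p => p.1 == k') = true := by
        intro k' hk'
        obtain ⟨p, hp, hpk⟩ := List.any_eq_true.1 (hks k' (List.mem_cons_of_mem _ hk'))
        rw [PySem.Dict.items_insert_of_contains _ _ hcd]
        refine List.any_eq_true.2 ⟨_, List.mem_map.2 ⟨p, hp, rfl⟩, ?_⟩
        by_cases hpkk : (p.1 == k) = true
        · simp only [hpkk, if_pos]
          rw [show k = p.1 from (eq_of_beq hpkk).symm]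
          exact hpk
        · simp only [hpkk]
          simpa using hpk
      rw [hstep, ih _ hks', PySem.Dict.items_insert_of_contains _ _ hcd, List.map_map]
      apply List.map_congr_left
      intro q _
      by_cases hq : (q.1 == k) = true
      · have hq' := eq_of_beq hq
        have hfq : hs.reverse.find? (fun h => pvNm h == q.1) = some hh := by rw [hq']; exact hf
        simp only [Function.comp, hq, if_pos]
        rw [List.contains_cons, hq, Bool.true_or]
        rw [hf, hfq]
        split_ifs <;> simp_all
      · simp only [Function.comp, hq, if_neg Bool.false_ne_true]
        rw [List.contains_cons, show (q.1 == k) = false from by simpa using hq, Bool.false_or]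

-- ===== VERDICT (by name: the statement is the Claim_ definition above) =====
theorem get_headers_from_message_spec : Claim_equal_get_headers_from_message := by
  intro baseData toFill _hdom _hpre
  unfold Spec_get_headers_from_message get_headers_from_message get_headers_from_message_alt
  by_cases hh : (PySem.Dict.mk baseData).contains "headers" = false
  · rw [if_pos hh, if_pos hh]
  · rw [if_neg hh, if_neg hh]
    rw [pv_A_char]
    have hks : ∀ k ∈ (PySem.Dict.mk toFill).keys,
        (PySem.Dict.mk toFill).items.any (fun p => p.1 == k) = true := by
      intro k hk
      simp only [PySem.Dict.keys] at hk
      obtain ⟨p, hp, he⟩ := List.mem_map.1 hk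
      exact List.any_eq_true.2 ⟨p, hp, by simp [he]⟩
    rw [pv_keyloop _ _ _ hks]
    apply List.map_congr_left
    intro q hq
    have hm : (PySem.Dict.mk toFill).keys.contains q.1 = true := by
      simp only [PySem.Dict.keys]
      exact List.contains_iff_mem.2 (List.mem_map.2 ⟨q, hq, rfl⟩)
    rw [if_pos hm, pv_F_find]
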